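-- pv_equiv track=rewrite | github.com/ElegantLin/UnrealGenAISupport | Content/Python/mcp_server.py | _select_fab_result
-- ===== SOURCE A (Python) =====
-- def _select_fab_result(results: list, preferred_listing_id_or_url: str = "", preferred_title_substring: str = ""):
--     listing_hint = (preferred_listing_id_or_url or "").strip().casefold()
--     if listing_hint:
--         for result in results:
--             listing_id = str(result.get("listing_id", "")).casefold()
--             listing_url = str(result.get("listing_url", "")).casefold()
--             if listing_hint == listing_id or listing_hint == listing_url:
--                 return result, "preferred_listing"
--
--     title_hint = (preferred_title_substring or "").strip().casefold()
--     if title_hint: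
--         for result in results:
--             title = str(result.get("title", "")).casefold()
--             if title_hint in title:
--                 return result, "preferred_title"
--
--     return (results[0], "first_verified_result") if results else (None, "")
-- ===== SOURCE B (Python) =====
-- def _select_fab_result(results: list, preferred_listing_id_or_url: str = "", preferred_title_substring: str = ""):
--     listing_hint = (preferred_listing_id_or_url or "").strip().casefold()
--     title_hint = (preferred_title_substring or "").strip().casefold()
--     title_candidate = None
--     for result in results:
--         if listing_hint and (
--             listing_hint == str(result.get("listing_id", "")).casefold()
--             or listing_hint == str(result.get("listing_url", "")).casefold()
--         ):
--             return result, "preferred_listing"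
--         if title_hint and title_candidate is None and title_hint in str(result.get("title", "")).casefold():
--             title_candidate = result
--     if title_candidate is not None:
--         return title_candidate, "preferred_title"
--     if results:
--         return results[0], "first_verified_result"
--     return None, ""
-- ===== Notes on version B (the rewrite author's own statement) =====
-- stated objective: alternative
-- what changed: A scans the results list up to three times (a listing loop, then a separate title loop, then results[0]); B makes a single pass that returns immediately on the first listing match while recording the first title match as a deferred candidate, deciding the fallback after the loop.
import Mathlib
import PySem

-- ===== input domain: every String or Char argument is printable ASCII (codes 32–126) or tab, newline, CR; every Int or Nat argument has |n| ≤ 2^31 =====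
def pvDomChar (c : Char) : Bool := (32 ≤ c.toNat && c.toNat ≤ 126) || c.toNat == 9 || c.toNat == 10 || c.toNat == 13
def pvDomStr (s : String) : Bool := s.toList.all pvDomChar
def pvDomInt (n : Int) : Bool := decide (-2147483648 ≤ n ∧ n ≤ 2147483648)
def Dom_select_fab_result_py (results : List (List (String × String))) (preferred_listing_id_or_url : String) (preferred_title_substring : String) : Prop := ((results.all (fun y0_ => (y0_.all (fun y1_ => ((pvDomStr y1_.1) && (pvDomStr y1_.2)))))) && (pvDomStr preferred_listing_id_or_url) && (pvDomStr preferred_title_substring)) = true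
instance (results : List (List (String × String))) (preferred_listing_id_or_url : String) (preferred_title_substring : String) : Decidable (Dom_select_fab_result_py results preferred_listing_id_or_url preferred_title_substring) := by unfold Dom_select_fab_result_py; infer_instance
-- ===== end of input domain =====

-- ===== PORT A =====
-- B differs only in traversal structure; same return value. (One honest line:
-- B fuses A's two scans into a single pass with a deferred title candidate; same O(n) cost.)
-- dict.get(k, "") on the association list: value of the first matching key, "" if absent (shared by both ports)
def dictGetStr (r : List (String × String)) (k : String) : String :=
  ((r.find? (fun p => p.1 == k)).map (fun p => p.2)).getD ""

-- (x or "").strip().casefold() on the ASCII domain (shared by both ports)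
def hintOf (s : String) : String := PySem.Str.lower (PySem.Str.strip s)

def select_fab_result_py (results : List (List (String × String))) (preferred_listing_id_or_url : String) (preferred_title_substring : String) : (Option (List (String × String))) × String :=
  -- 'for result in results: … return …' = first element satisfying the condition
  match (if hintOf preferred_listing_id_or_url = "" then none
         else results.find? (fun r =>
           hintOf preferred_listing_id_or_url == PySem.Str.lower (dictGetStr r "listing_id") ||
           hintOf preferred_listing_id_or_url == PySem.Str.lower (dictGetStr r "listing_url"))) with
  | some r => (some r, "preferred_listing")
  | none =>
    match (if hintOf preferred_title_substring = "" then none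
           else results.find? (fun r =>
             PySem.Str.isIn (hintOf preferred_title_substring) (PySem.Str.lower (dictGetStr r "title")))) with
    | some r => (some r, "preferred_title")
    | none =>
      match results with
      | [] => (none, "")
      | r :: _ => (some r, "first_verified_result")

-- ===== PORT B =====
-- single pass: return on first listing match, record first title match as candidate
def bGo (lh th : String) (rs : List (List (String × String))) (cand : Option (List (String × String))) : Option ((List (String × String)) × String) :=
  match rs with
  | [] => cand.map (fun c => (c, "preferred_title"))
  | r :: rest =>
    if lh ≠ "" ∧ (lh == PySem.Str.lower (dictGetStr r "listing_id") ||
                  lh == PySem.Str.lower (dictGetStr r "listing_url")) = true then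
      some (r, "preferred_listing")
    else
      bGo lh th rest
        (if th ≠ "" ∧ cand = none ∧ PySem.Str.isIn th (PySem.Str.lower (dictGetStr r "title")) = true
         then some r else cand)

def select_fab_result_py_alt (results : List (List (String × String))) (preferred_listing_id_or_url : String) (preferred_title_substring : String) : (Option (List (String × String))) × String :=
  match bGo (hintOf preferred_listing_id_or_url) (hintOf preferred_title_substring) results none with
  | some (r, tag) => (some r, tag)
  | none =>
    match results with
    | [] => (none, "")
    | r :: _ => (some r, "first_verified_result")

-- ===== PRECONDITION & SPEC =====
def Spec_select_fab_result_py (results : List (List (String × String))) (preferred_listing_id_or_url : String) (preferred_title_substring : String) (out : (Option (List (String × String))) × String) : Prop := out = select_fab_result_py_alt results preferred_listing_id_or_url preferred_title_substring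
instance (results : List (List (String × String))) (preferred_listing_id_or_url : String) (preferred_title_substring : String) (out : (Option (List (String × String))) × String) : Decidable (Spec_select_fab_result_py results preferred_listing_id_or_url preferred_title_substring out) := by unfold Spec_select_fab_result_py; infer_instance

-- ===== CLAIM (what is proved, stated in full; the proofs are below) =====
def Claim_equal_select_fab_result_py : Prop := ∀ (results : List (List (String × String))) (preferred_listing_id_or_url : String) (preferred_title_substring : String), Dom_select_fab_result_py results preferred_listing_id_or_url preferred_title_substring → Spec_select_fab_result_py results preferred_listing_id_or_url preferred_title_substring (select_fab_result_py results preferred_listing_id_or_url preferred_title_substring)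

-- ===== LEMMAS AND PROOFS =====
-- bGo equals: first listing match if any; else the candidate, else the first title match
theorem bGo_eq (lh th : String) (rs : List (List (String × String))) (cand : Option (List (String × String))) :
    bGo lh th rs cand =
      match rs.find? (fun r =>
        decide (lh ≠ "") && (lh == PySem.Str.lower (dictGetStr r "listing_id") ||
                             lh == PySem.Str.lower (dictGetStr r "listing_url"))) with
      | some r => some (r, "preferred_listing")
      | none =>
        match cand with
        | some c => some (c, "preferred_title")
        | none =>
          (rs.find? (fun r =>
            decide (th ≠ "") && PySem.Str.isIn th (PySem.Str.lower (dictGetStr r "title")))).map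
            (fun r => (r, "preferred_title")) := by
  induction rs generalizing cand with
  | nil => cases cand <;> simp [bGo]
  | cons r rest ih =>
    by_cases hL : lh ≠ "" ∧ (lh == PySem.Str.lower (dictGetStr r "listing_id") ||
                             lh == PySem.Str.lower (dictGetStr r "listing_url")) = true
    · simp [bGo, hL]
    · have hLb : (decide (lh ≠ "") && (lh == PySem.Str.lower (dictGetStr r "listing_id") ||
          lh == PySem.Str.lower (dictGetStr r "listing_url"))) = false := by
        by_cases h1 : lh = "" <;> simp_all
      rw [bGo, if_neg hL, ih]
      simp only [List.find?_cons, hLb]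
      cases hF : rest.find? (fun r =>
        decide (lh ≠ "") && (lh == PySem.Str.lower (dictGetStr r "listing_id") ||
                             lh == PySem.Str.lower (dictGetStr r "listing_url"))) with
      | some _ => simp
      | none =>
        simp only
        by_cases hT : th ≠ "" ∧ cand = none ∧ PySem.Str.isIn th (PySem.Str.lower (dictGetStr r "title")) = true
        · obtain ⟨h1, h2, h3⟩ := hT
          have h3' : PySem.Chars.isIn th.toList (PySem.Chars.lower (dictGetStr r "title").toList) = true := by
            simpa using h3
          simp [h1, h2, h3']
        · cases cand with
          | some c => simp
          | none =>
            have hT' : ¬(¬th = "" ∧ PySem.Chars.isIn th.toList (PySem.Chars.lower (dictGetStr r "title").toList) = true) := by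
              simpa using hT
            have hTb' : (!decide (th = "") && PySem.Chars.isIn th.toList (PySem.Chars.lower (dictGetStr r "title").toList)) = false := by
              by_cases hth : th = "" <;> simp_all
            simp [hT', hTb']

-- 'if hint is empty skip the loop' = fold the emptiness guard into the loop predicate
theorem find?_guard_str {α : Type} (s : String) (p : α → Bool) (rs : List α) :
    (if s = "" then none else rs.find? p) = rs.find? (fun r => decide (s ≠ "") && p r) := by
  by_cases h : s = ""
  · simp only [h, if_pos, decide_not]
    exact (List.find?_eq_none.mpr (by simp)).symm
  · simp [h]

set_option maxHeartbeats 1000000 in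
theorem shapes_eq (lh th : String) (rs : List (List (String × String))) :
    (match (if lh = "" then none else rs.find? (fun r =>
        lh == PySem.Str.lower (dictGetStr r "listing_id") ||
        lh == PySem.Str.lower (dictGetStr r "listing_url"))) with
     | some r => (some r, "preferred_listing")
     | none =>
       match (if th = "" then none else rs.find? (fun r =>
           PySem.Str.isIn th (PySem.Str.lower (dictGetStr r "title")))) with
       | some r => (some r, "preferred_title")
       | none =>
         match rs with
         | [] => ((none : Option (List (String × String))), "")
         | r :: _ => (some r, "first_verified_result")) =
    (match bGo lh th rs none with
     | some (r, tag) => (some r, tag)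
     | none =>
       match rs with
       | [] => ((none : Option (List (String × String))), "")
       | r :: _ => (some r, "first_verified_result")) := by
  rw [bGo_eq,
      ← find?_guard_str lh (fun r => lh == PySem.Str.lower (dictGetStr r "listing_id") ||
        lh == PySem.Str.lower (dictGetStr r "listing_url")) rs,
      ← find?_guard_str th (fun r => PySem.Str.isIn th (PySem.Str.lower (dictGetStr r "title"))) rs]
  cases h1 : (if lh = "" then none else rs.find? (fun r =>
      lh == PySem.Str.lower (dictGetStr r "listing_id") ||
      lh == PySem.Str.lower (dictGetStr r "listing_url"))) <;>
    cases h2 : (if th = "" then none else rs.find? (fun r =>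
      PySem.Str.isIn th (PySem.Str.lower (dictGetStr r "title")))) <;>
    simp

-- ===== VERDICT (by name: the statement is the Claim_ definition above) =====
set_option maxHeartbeats 2000000 in
theorem select_fab_result_py_spec : Claim_equal_select_fab_result_py := by
  intro results pid pts _
  show select_fab_result_py results pid pts = select_fab_result_py_alt results pid pts
  unfold select_fab_result_py select_fab_result_py_alt
  exact shapes_eq (hintOf pid) (hintOf pts) results
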